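-- pv_equiv track=rewrite | github.com/Arfatnaik0/GameOn | backend/services/store_prices.py | _normalize_store_key
-- ===== SOURCE A (Python) =====
-- STORE_CONFIG = {
--     "steam": {"name": "Steam", "aliases": {"steam"}},
--     "epic_games": {"name": "Epic Games", "aliases": {"epic-games", "epic_games", "epic"}},
--     "playstation_store": {"name": "PlayStation Store", "aliases": {"playstation-store", "playstation_store", "playstation"}},
--     "xbox_store": {"name": "Xbox Store", "aliases": {"xbox-store", "xbox_store", "xbox"}},
-- }
--
-- def _normalize_store_key(slug: str | None) -> str | None:
--     if not slug:
--         return None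
--     normalized = str(slug).strip().lower().replace(" ", "-").replace("_", "-")
--     for store_key, config in STORE_CONFIG.items():
--         if normalized in config["aliases"]:
--             return store_key
--     return None
-- ===== SOURCE B (Python) =====
-- # B: one flat reverse map alias -> store key, built once; the function is a single dict lookup.
-- STORE_CONFIG = {
--     "steam": {"name": "Steam", "aliases": {"steam"}},
--     "epic_games": {"name": "Epic Games", "aliases": {"epic-games", "epic_games", "epic"}},
--     "playstation_store": {"name": "PlayStation Store", "aliases": {"playstation-store", "playstation_store", "playstation"}},
--     "xbox_store": {"name": "Xbox Store", "aliases": {"xbox-store", "xbox_store", "xbox"}},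
-- }
--
-- ALIAS_TO_KEY = {alias: store_key
--                 for store_key, cfg in STORE_CONFIG.items()
--                 for alias in cfg["aliases"]}
--
-- def _normalize_store_key(slug):
--     if not slug:
--         return None
--     normalized = str(slug).strip().lower().replace(" ", "-").replace("_", "-")
--     return ALIAS_TO_KEY.get(normalized)
-- ===== Notes on version B (the rewrite author's own statement) =====
-- stated objective: idiomatic
-- what changed: Replaces the per-call scan over STORE_CONFIG entries with inner set-membership tests by a module-level flat reverse map ALIAS_TO_KEY built once, so the function is one direct dict lookup.
import Mathlib
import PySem

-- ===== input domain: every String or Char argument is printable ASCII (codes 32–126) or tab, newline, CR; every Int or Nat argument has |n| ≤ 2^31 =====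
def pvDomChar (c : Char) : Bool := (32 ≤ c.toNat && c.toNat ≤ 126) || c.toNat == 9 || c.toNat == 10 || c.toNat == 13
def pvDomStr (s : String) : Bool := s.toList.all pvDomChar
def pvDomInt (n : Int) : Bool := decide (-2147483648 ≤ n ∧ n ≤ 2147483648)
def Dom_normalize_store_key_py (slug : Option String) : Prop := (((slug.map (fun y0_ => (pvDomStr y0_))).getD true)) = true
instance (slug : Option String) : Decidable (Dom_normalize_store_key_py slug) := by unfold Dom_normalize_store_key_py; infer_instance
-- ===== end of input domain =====

-- B differs from A only in data layout (a precomputed flat reverse map); return values proved equal.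

-- ===== PORT A =====
-- STORE_CONFIG: per store its key, its "name", and its alias set (only key and aliases are read).
def storeConfigA : List (String × String × PySem.Set String) :=
  [ ("steam", "Steam", PySem.Set.ofList ["steam"]),
    ("epic_games", "Epic Games", PySem.Set.ofList ["epic-games", "epic_games", "epic"]),
    ("playstation_store", "PlayStation Store", PySem.Set.ofList ["playstation-store", "playstation_store", "playstation"]),
    ("xbox_store", "Xbox Store", PySem.Set.ofList ["xbox-store", "xbox_store", "xbox"]) ]

-- the 'for store_key, config in STORE_CONFIG.items(): if normalized in config["aliases"]: return store_key' loop
def scanA : List (String × String × PySem.Set String) → String → Option String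
  | [], _ => none
  | (store_key, _, aliases) :: rest, normalized =>
      if PySem.Set.contains aliases normalized then some store_key else scanA rest normalized

def normalize_store_key_py (slug : Option String) : Option String :=
  match slug with
  | none => none                     -- 'if not slug: return None'
  | some s =>
    if s == "" then none
    else
      let normalized :=
        PySem.Str.replace (PySem.Str.replace (PySem.Str.lower (PySem.Str.strip s)) " " "-") "_" "-"
      scanA storeConfigA normalized

-- ===== PORT B =====
-- ALIAS_TO_KEY = {alias: store_key for store_key, cfg in STORE_CONFIG.items() for alias in cfg["aliases"]}
def aliasToKey : PySem.Dict String String :=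
  PySem.Dict.ofList
    [ ("steam", "steam"),
      ("epic-games", "epic_games"), ("epic_games", "epic_games"), ("epic", "epic_games"),
      ("playstation-store", "playstation_store"), ("playstation_store", "playstation_store"), ("playstation", "playstation_store"),
      ("xbox-store", "xbox_store"), ("xbox_store", "xbox_store"), ("xbox", "xbox_store") ]

def normalize_store_key_py_alt (slug : Option String) : Option String :=
  match slug with
  | none => none                     -- 'if not slug: return None'
  | some s =>
    if s == "" then none
    else
      let normalized :=
        PySem.Str.replace (PySem.Str.replace (PySem.Str.lower (PySem.Str.strip s)) " " "-") "_" "-"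
      PySem.Dict.get? aliasToKey normalized

-- ===== PRECONDITION & SPEC =====
def Spec_normalize_store_key_py (slug : Option String) (out : Option String) : Prop := out = normalize_store_key_py_alt slug
instance (slug : Option String) (out : Option String) : Decidable (Spec_normalize_store_key_py slug out) := by unfold Spec_normalize_store_key_py; infer_instance

-- ===== CLAIM (what is proved, stated in full; the proofs are below) =====
def Claim_equal_normalize_store_key_py : Prop := ∀ (slug : Option String), Dom_normalize_store_key_py slug → Spec_normalize_store_key_py slug (normalize_store_key_py slug)

-- ===== LEMMAS AND PROOFS =====
-- Core fact: the scan over STORE_CONFIG and the flat reverse-map lookup agree on every string.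
theorem scan_eq_lookup (n : String) : scanA storeConfigA n = PySem.Dict.get? aliasToKey n := by
  by_cases h0 : n = "steam"
  · subst h0; rfl
  by_cases h1 : n = "epic-games"
  · subst h1; rfl
  by_cases h2 : n = "epic_games"
  · subst h2; rfl
  by_cases h3 : n = "epic"
  · subst h3; rfl
  by_cases h4 : n = "playstation-store"
  · subst h4; rfl
  by_cases h5 : n = "playstation_store"
  · subst h5; rfl
  by_cases h6 : n = "playstation"
  · subst h6; rfl
  by_cases h7 : n = "xbox-store"
  · subst h7; rfl
  by_cases h8 : n = "xbox_store"
  · subst h8; rfl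
  by_cases h9 : n = "xbox"
  · subst h9; rfl
  have g0 : ("steam" == n) = false := beq_eq_false_iff_ne.mpr (Ne.symm h0)
  have g1 : ("epic-games" == n) = false := beq_eq_false_iff_ne.mpr (Ne.symm h1)
  have g2 : ("epic_games" == n) = false := beq_eq_false_iff_ne.mpr (Ne.symm h2)
  have g3 : ("epic" == n) = false := beq_eq_false_iff_ne.mpr (Ne.symm h3)
  have g4 : ("playstation-store" == n) = false := beq_eq_false_iff_ne.mpr (Ne.symm h4)
  have g5 : ("playstation_store" == n) = false := beq_eq_false_iff_ne.mpr (Ne.symm h5)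
  have g6 : ("playstation" == n) = false := beq_eq_false_iff_ne.mpr (Ne.symm h6)
  have g7 : ("xbox-store" == n) = false := beq_eq_false_iff_ne.mpr (Ne.symm h7)
  have g8 : ("xbox_store" == n) = false := beq_eq_false_iff_ne.mpr (Ne.symm h8)
  have g9 : ("xbox" == n) = false := beq_eq_false_iff_ne.mpr (Ne.symm h9)
  simp [scanA, storeConfigA, aliasToKey, PySem.Dict.ofList, PySem.Dict.get?,
    PySem.Set.contains, PySem.Set.ofList, PySem.Set.add, PySem.Set.empty, PySem.Dict.update,
    PySem.Dict.insert, PySem.Dict.empty, PySem.Dict.contains, List.find?,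
    h0, h1, h2, h3, h4, h5, h6, h7, h8, h9, g0, g1, g2, g3, g4, g5, g6, g7, g8, g9]

-- ===== VERDICT (by name: the statement is the Claim_ definition above) =====
theorem normalize_store_key_py_spec : Claim_equal_normalize_store_key_py := by
  intro slug _
  unfold Spec_normalize_store_key_py normalize_store_key_py normalize_store_key_py_alt
  cases slug with
  | none => rfl
  | some s =>
    by_cases h : s == ""
    · simp [h]
    · simp only [h, if_neg, Bool.false_eq_true, not_false_eq_true]
      exact scan_eq_lookup _
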